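-- pv_equiv track=rewrite | github.com/eudahub/eudaBB | board/bbcode.py | _apply_escapes
-- ===== SOURCE A (Python) =====
-- _ESC_BACKSLASH = "\U000F0001"
--
-- _ESC_LBRACKET  = "\U000F0002"
--
-- _ESC_RBRACKET  = "\U000F0003"
--
-- def _apply_escapes(text: str) -> str:
--     result = []
--     i = 0
--     while i < len(text):
--         if text[i] == "\\" and i + 1 < len(text):
--             nxt = text[i + 1]
--             if nxt == "\\":
--                 result.append(_ESC_BACKSLASH); i += 2; continue
--             elif nxt == "[":
--                 result.append(_ESC_LBRACKET);  i += 2; continue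
--             elif nxt == "]":
--                 result.append(_ESC_RBRACKET);  i += 2; continue
--         result.append(text[i])
--         i += 1
--     return "".join(result)
-- ===== SOURCE B (Python) =====
-- _ESC_BACKSLASH = "\U000F0001"
--
-- _ESC_LBRACKET  = "\U000F0002"
--
-- _ESC_RBRACKET  = "\U000F0003"
--
-- def _apply_escapes(text: str) -> str:
--     # Three whole-string replacements; backslash-backslash first so it is
--     # consumed before the bracket escapes can mis-match (e.g. in "\\\\]").
--     return (text.replace("\\\\", _ESC_BACKSLASH)
--                 .replace("\\[", _ESC_LBRACKET)
--                 .replace("\\]", _ESC_RBRACKET))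
-- ===== Notes on version B (the rewrite author's own statement) =====
-- stated objective: faster
-- what changed: Replaces the manual index-driven while-loop scanner with three chained whole-string str.replace passes (backslash-backslash first, then backslash-lbracket, then backslash-rbracket).
import Mathlib
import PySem

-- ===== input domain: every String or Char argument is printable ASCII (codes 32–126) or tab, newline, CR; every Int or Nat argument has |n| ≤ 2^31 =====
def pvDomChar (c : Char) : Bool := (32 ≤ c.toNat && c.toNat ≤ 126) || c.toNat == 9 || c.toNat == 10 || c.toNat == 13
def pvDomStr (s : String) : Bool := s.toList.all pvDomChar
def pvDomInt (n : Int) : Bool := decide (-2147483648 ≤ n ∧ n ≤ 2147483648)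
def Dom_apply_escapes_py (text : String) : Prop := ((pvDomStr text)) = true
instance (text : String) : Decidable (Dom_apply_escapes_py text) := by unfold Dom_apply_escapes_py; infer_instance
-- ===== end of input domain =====

-- B replaces A's manual index-driven while-loop scanner with three chained
-- whole-string str.replace passes (backslash-backslash first); same O(n), measured faster (C-level replace).


-- the three sentinel characters
def escBackslash : Char := Char.ofNat 983041  -- U+F0001
def escLBracket  : Char := Char.ofNat 983042  -- U+F0002
def escRBracket  : Char := Char.ofNat 983043  -- U+F0003

-- ===== PORT A =====
-- A's while loop over the characters: look at text[i]; if it is a backslash and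
-- a next char exists, dispatch on that next char (consuming two chars) else copy one.
def scanA : List Char → List Char
  | [] => []
  | c :: t =>
    if c = '\\' then
      match t with
      | d :: t' =>
        if d = '\\' then escBackslash :: scanA t'
        else if d = '[' then escLBracket :: scanA t'
        else if d = ']' then escRBracket :: scanA t'
        else c :: scanA (d :: t')
      | [] => c :: scanA []
    else c :: scanA t

def apply_escapes_py (text : String) : String := String.ofList (scanA text.toList)

-- ===== PORT B =====
def apply_escapes_py_alt (text : String) : String :=
  PySem.Str.replace
    (PySem.Str.replace
      (PySem.Str.replace text "\\\\" (String.ofList [escBackslash]))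
      "\\[" (String.ofList [escLBracket]))
    "\\]" (String.ofList [escRBracket])

-- ===== PRECONDITION & SPEC =====
def Spec_apply_escapes_py (text : String) (out : String) : Prop := out = apply_escapes_py_alt text
instance (text : String) (out : String) : Decidable (Spec_apply_escapes_py text out) := by unfold Spec_apply_escapes_py; infer_instance

-- ===== CLAIM (what is proved, stated in full; the proofs are below) =====
def Claim_equal_apply_escapes_py : Prop := ∀ (text : String), Dom_apply_escapes_py text → Spec_apply_escapes_py text (apply_escapes_py text)

-- ===== LEMMAS AND PROOFS =====

-- replacing the two-char pattern ['\\', b] by [r], left to right, non-overlapping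
def repPair (b r : Char) : List Char → List Char
  | x :: y :: t => if x = '\\' ∧ y = b then r :: repPair b r t else x :: repPair b r (y :: t)
  | l => l

theorem go_eq (b r : Char) (fuel : Nat) :
    ∀ (l acc : List Char), l.length ≤ fuel →
      PySem.Chars.replace.go ['\\', b] [r] fuel l acc = acc.reverse ++ repPair b r l := by
  induction fuel with
  | zero =>
    intro l acc h
    have : l = [] := List.length_eq_zero_iff.mp (Nat.le_zero.mp h)
    subst this
    simp [PySem.Chars.replace.go, repPair]
  | succ n ih =>
    intro l acc h
    cases l with
    | nil => simp [PySem.Chars.replace.go, repPair]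
    | cons c t =>
      cases t with
      | nil =>
        have hp : (['\\', b].isPrefixOf [c]) = false := by
          simp [List.isPrefixOf]
        rw [PySem.Chars.replace.go]
        simp only [hp, Bool.false_eq_true, reduceIte]
        rw [ih [] (c :: acc) (by simp)]
        simp [repPair]
      | cons d t' =>
        rw [PySem.Chars.replace.go]
        by_cases hcd : c = '\\' ∧ d = b
        · have hp : (['\\', b].isPrefixOf (c :: d :: t')) = true := by
            simp [List.isPrefixOf, hcd.1, hcd.2]
          simp only [hp, reduceIte]
          rw [show List.drop ['\\', b].length (c :: d :: t') = t' from rfl]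
          rw [ih t' ([r].reverse ++ acc) (by simp at h ⊢; omega)]
          have : repPair b r (c :: d :: t') = r :: repPair b r t' := by
            show (if c = '\\' ∧ d = b then r :: repPair b r t' else c :: repPair b r (d :: t')) = _
            rw [if_pos hcd]
          rw [this]
          simp
        · have hp : (['\\', b].isPrefixOf (c :: d :: t')) = false := by
            simp [List.isPrefixOf]
            tauto
          simp only [hp, Bool.false_eq_true, reduceIte]
          rw [ih (d :: t') (c :: acc) (by simp at h ⊢; omega)]
          have : repPair b r (c :: d :: t') = c :: repPair b r (d :: t') := by
            show (if c = '\\' ∧ d = b then r :: repPair b r t' else c :: repPair b r (d :: t')) = _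
            rw [if_neg hcd]
          rw [this]
          simp

theorem replace_eq (b r : Char) (l : List Char) :
    PySem.Chars.replace l ['\\', b] [r] = repPair b r l := by
  rw [PySem.Chars.replace]
  simp only [List.isEmpty_cons, if_neg Bool.false_ne_true]
  simpa using go_eq b r l.length l [] (le_refl _)

-- a non-backslash head passes unchanged through repPair
theorem repPair_cons_ne (b r c : Char) (hc : c ≠ '\\') (l : List Char) :
    repPair b r (c :: l) = c :: repPair b r l := by
  cases l with
  | nil => rfl
  | cons d t =>
    show (if c = '\\' ∧ d = b then r :: repPair b r t else c :: repPair b r (d :: t)) = _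
    rw [if_neg (fun h => hc h.1)]

theorem escBackslash_ne : escBackslash ≠ '\\' := by decide
theorem escLBracket_ne : escLBracket ≠ '\\' := by decide

-- hit and miss steps of repPair on a backslash head
theorem repPair_hit (b r : Char) (t : List Char) :
    repPair b r ('\\' :: b :: t) = r :: repPair b r t := by
  show (if ('\\' : Char) = '\\' ∧ b = b then r :: repPair b r t else _) = _
  rw [if_pos ⟨rfl, rfl⟩]

theorem repPair_miss (b r d : Char) (hd : d ≠ b) (t : List Char) :
    repPair b r ('\\' :: d :: t) = '\\' :: repPair b r (d :: t) := by
  show (if ('\\' : Char) = '\\' ∧ d = b then r :: repPair b r t else '\\' :: repPair b r (d :: t)) = _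
  rw [if_neg (fun h => hd h.2)]

-- the heart of the matter: the one-pass scanner equals the three chained passes
theorem scanA_eq_chain (l : List Char) :
    scanA l =
      repPair ']' escRBracket (repPair '[' escLBracket (repPair '\\' escBackslash l)) := by
  induction l using scanA.induct with
  | case1 => simp [scanA, repPair]
  | case2 t' ih =>
    have l1 : scanA ('\\' :: '\\' :: t') = escBackslash :: scanA t' := by simp [scanA]
    rw [l1, ih, repPair_hit,
        repPair_cons_ne _ _ _ escBackslash_ne, repPair_cons_ne _ _ _ escBackslash_ne]
  | case3 t' _h ih =>
    have l1 : scanA ('\\' :: '[' :: t') = escLBracket :: scanA t' := by simp [scanA]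
    rw [l1, ih, repPair_miss '\\' escBackslash '[' (by decide),
        repPair_cons_ne '\\' escBackslash '[' (by decide),
        repPair_hit '[' escLBracket, repPair_cons_ne _ _ _ escLBracket_ne]
  | case4 t' _h1 _h2 ih =>
    have l1 : scanA ('\\' :: ']' :: t') = escRBracket :: scanA t' := by simp [scanA]
    rw [l1, ih, repPair_miss '\\' escBackslash ']' (by decide),
        repPair_cons_ne '\\' escBackslash ']' (by decide),
        repPair_miss '[' escLBracket ']' (by decide),
        repPair_cons_ne '[' escLBracket ']' (by decide),
        repPair_hit ']' escRBracket]
  | case5 d t' hd1 hd2 hd3 ih =>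
    have l1 : scanA ('\\' :: d :: t') = '\\' :: scanA (d :: t') := by
      simp [scanA, hd1, hd2, hd3]
    rw [l1, ih, repPair_miss '\\' escBackslash d hd1,
        repPair_cons_ne '\\' escBackslash d hd1,
        repPair_miss '[' escLBracket d hd2,
        repPair_cons_ne '[' escLBracket d hd1,
        repPair_miss ']' escRBracket d hd3,
        repPair_cons_ne ']' escRBracket d hd1]
  | case6 _ih => simp [scanA, repPair]
  | case7 c t hc ih =>
    have l1 : scanA (c :: t) = c :: scanA t := by
      cases t with
      | nil => simp [scanA, hc]
      | cons d t' => simp [scanA, hc]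
    rw [l1, ih, repPair_cons_ne '\\' escBackslash c hc, repPair_cons_ne '[' escLBracket c hc,
        repPair_cons_ne ']' escRBracket c hc]

theorem alt_eq (text : String) :
    apply_escapes_py_alt text = String.ofList
      (repPair ']' escRBracket (repPair '[' escLBracket (repPair '\\' escBackslash text.toList))) := by
  unfold apply_escapes_py_alt
  rw [PySem.Str.replace, PySem.Str.replace, PySem.Str.replace]
  simp only [String.toList_ofList]
  rw [show ("\\\\" : String).toList = ['\\', '\\'] from rfl,
      show ("\\[" : String).toList = ['\\', '['] from rfl,
      show ("\\]" : String).toList = ['\\', ']'] from rfl]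
  rw [replace_eq, replace_eq, replace_eq]

-- ===== VERDICT (by name: the statement is the Claim_ definition above) =====
theorem apply_escapes_py_spec : Claim_equal_apply_escapes_py := by
  intro text _
  unfold Spec_apply_escapes_py apply_escapes_py
  rw [alt_eq, scanA_eq_chain]
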